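-- pv_equiv track=rewrite | github.com/WXW322/algorithm | leetcode10.py | transp
-- ===== SOURCE A (Python) =====
-- def transp(p):
--     length = len(p)
--     if length == 0:
--         return p
--
--     p_new = ''
--     for i in range(len(p)):
--         if p_new == '':
--             p_new = p[i]
--         elif p_new[-1] == '*':
--             if p[i] == '*':
--                 continue
--             else:
--                 p_new = p_new + p[i]
--         else:
--             p_new = p_new + p[i]
--     lo = 0
--     for i in range(len(p_new)):
--         if p_new[i] != '*':
--             break
--     p_new = p_new[i:]
--     return p_new
-- ===== SOURCE B (Python) =====
-- def transp(p):
--     if not p: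
--         return p
--     segs = [s for s in p.split('*') if s]
--     if not segs:
--         return '*'
--     return '*'.join(segs) + ('*' if p.endswith('*') else '')
-- ===== Notes on version B (the rewrite author's own statement) =====
-- stated objective: faster
-- what changed: Replaces A's two explicit scanning loops (character-by-character accumulator append via string concatenation, then an index scan to strip leading stars) by a split/filter/join pipeline: split on the star separator, drop empty segments, rejoin with single stars, re-adding a trailing star and returning a single star when no segment survives.
import Mathlib
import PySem

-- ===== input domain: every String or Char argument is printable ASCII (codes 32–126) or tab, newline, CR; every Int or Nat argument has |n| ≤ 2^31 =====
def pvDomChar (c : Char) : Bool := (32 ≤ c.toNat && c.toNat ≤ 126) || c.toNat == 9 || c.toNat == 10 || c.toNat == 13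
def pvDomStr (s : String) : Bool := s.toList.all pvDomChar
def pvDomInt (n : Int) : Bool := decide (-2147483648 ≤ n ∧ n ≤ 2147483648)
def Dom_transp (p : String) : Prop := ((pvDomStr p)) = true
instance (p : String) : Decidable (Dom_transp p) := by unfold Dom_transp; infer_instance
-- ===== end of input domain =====

-- B replaces A's two scanning loops (append-unless-accumulator-ends-in-star, then an index
-- scan stripping leading stars) by a split/filter/join pipeline over the '*'-separated segments.

-- ===== PORT A =====
-- one iteration of A's first loop: the accumulator is p_new, c is p[i]
def transpStep (acc : List Char) (c : Char) : List Char :=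
  if acc = [] then [c]
  else if acc.getLast! = '*' then (if c = '*' then acc else acc ++ [c])
  else acc ++ [c]

-- A's second loop: `for i in range(len(p_new)): if p_new[i] != '*': break`; returns the
-- final value of i (the break index, or the last index when the loop runs out)
def transpLoop2 : List Char → Nat → Nat
  | [], i => i
  | c :: rest, i => if c ≠ '*' then i else (if rest = [] then i else transpLoop2 rest (i + 1))

def transp (p : String) : String :=
  if p.toList.length = 0 then p
  else
    let pn := p.toList.foldl transpStep []
    let i := transpLoop2 pn 0
    String.ofList (pn.drop i)

-- ===== PORT B =====
-- p.split('*') / '*'.join ported as List.splitOn '*' / List.intercalate ['*'] (exact for a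
-- one-character separator); p.endswith('*') as PySem.Chars.endswith.
def transp_alt (p : String) : String :=
  if p.toList = [] then p
  else
    let segs := (p.toList.splitOn '*').filter (fun s => s ≠ [])
    if segs = [] then "*"
    else String.ofList (List.intercalate ['*'] segs ++
          (if PySem.Chars.endswith p.toList ['*'] then ['*'] else []))

-- ===== PRECONDITION & SPEC =====
def Spec_transp (p : String) (out : String) : Prop := out = transp_alt p
instance (p : String) (out : String) : Decidable (Spec_transp p out) := by unfold Spec_transp; infer_instance

-- ===== CLAIM (what is proved, stated in full; the proofs are below) =====
def Claim_equal_transp : Prop := ∀ (p : String), Dom_transp p → Spec_transp p (transp p)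

-- ===== LEMMAS AND PROOFS =====

-- the common mathematical object: collapse consecutive stars, given the previous char
def collapse : Char → List Char → List Char
  | _, [] => []
  | prev, c :: rest => if c = '*' ∧ prev = '*' then collapse prev rest else c :: collapse c rest

-- ---- A-side characterisation ----

theorem foldl_step_eq_collapse (cs : List Char) (acc : List Char) (l : Char)
    (h : acc ≠ []) (hl : acc.getLast! = l) :
    cs.foldl transpStep acc = acc ++ collapse l cs := by
  induction cs generalizing acc l with
  | nil => simp [collapse]
  | cons c rest ih =>
    simp only [List.foldl_cons, collapse]
    by_cases hc : c = '*' ∧ l = '*'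
    · have hstep : transpStep acc c = acc := by
        simp only [transpStep]
        rw [if_neg h, hl]
        simp [hc.1, hc.2]
      rw [hstep, ih acc l h hl]
      simp [hc]
    · have hstep : transpStep acc c = acc ++ [c] := by
        simp only [transpStep]
        rw [if_neg h, hl]
        by_cases hstar : l = '*'
        · have hcs : c ≠ '*' := by tauto
          simp [hstar, hcs]
        · simp [hstar]
      have hlast : (acc ++ [c]).getLast! = c := by
        simp [List.getLast!_eq_getLast?_getD]
      rw [hstep, ih (acc ++ [c]) c (by simp) hlast]
      simp [hc]

-- collapse with previous '*' never starts with '*'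
theorem collapse_star_head (cs : List Char) :
    collapse '*' cs = [] ∨ ∃ d t, collapse '*' cs = d :: t ∧ d ≠ '*' := by
  induction cs with
  | nil => exact Or.inl rfl
  | cons c rest ih =>
    by_cases hc : c = '*'
    · subst hc; simpa [collapse] using ih
    · exact Or.inr ⟨c, collapse c rest, by simp [collapse, hc], hc⟩

-- A's value on a nonempty input, in terms of collapse
theorem transp_char (c : Char) (cs : List Char) :
    transp (String.ofList (c :: cs)) =
      String.ofList (if collapse '*' (c :: cs) = [] then ['*'] else collapse '*' (c :: cs)) := by
  unfold transp
  simp only [String.toList_ofList]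
  rw [if_neg (by simp)]
  have hfold : (c :: cs).foldl transpStep [] = c :: collapse c cs := by
    simp only [List.foldl_cons]
    have h1 : transpStep [] c = [c] := by simp [transpStep]
    have h2 : ([c] : List Char).getLast! = c := by
      simp [List.getLast!_eq_getLast?_getD]
    rw [h1, foldl_step_eq_collapse cs [c] c (by simp) h2]
    rfl
  rw [hfold]
  by_cases hc : c = '*'
  · subst hc
    have hcol : collapse '*' ('*' :: cs) = collapse '*' cs := by simp [collapse]
    rcases collapse_star_head cs with h0 | ⟨d, t, heq, hd⟩
    · rw [h0]; simp [transpLoop2, hcol, h0]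
    · rw [heq]
      simp [transpLoop2, hd, hcol, heq]
  · have hcol : collapse '*' (c :: cs) = c :: collapse c cs := by simp [collapse, hc]
    simp [transpLoop2, hc, hcol]

-- ---- B-side characterisation ----

-- collapse does not depend on the previous char as long as it is not a star
theorem collapse_nonstar (a b : Char) (ha : a ≠ '*') (hb : b ≠ '*') (l : List Char) :
    collapse a l = collapse b l := by
  cases l with
  | nil => rfl
  | cons c rest => simp [collapse, ha, hb]

-- pushing a star-free prefix out of collapse
theorem collapse_append_no_star (s0 : List Char) (m : List Char) (a : Char) (ha : a ≠ '*')
    (hs : ∀ x ∈ s0, x ≠ '*') :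
    collapse a (s0 ++ m) = s0 ++ collapse 'x' m := by
  induction s0 generalizing a with
  | nil => simpa using collapse_nonstar a 'x' ha (by decide) m
  | cons d s0' ih =>
    have hd : d ≠ '*' := hs d (by simp)
    have hstep : collapse a (d :: (s0' ++ m)) = d :: collapse d (s0' ++ m) := by
      simp [collapse, hd]
    rw [List.cons_append, hstep, ih d hd (fun x hx => hs x (List.mem_cons_of_mem _ hx))]
    simp

theorem collapse_all_star (l : List Char) (h : ∀ x ∈ l, x = '*') : collapse '*' l = [] := by
  induction l with
  | nil => rfl
  | cons c rest ih =>
    have hc : c = '*' := h c (by simp)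
    subst hc
    have hstep : collapse '*' ('*' :: rest) = collapse '*' rest := by simp [collapse]
    rw [hstep]
    exact ih (fun x hx => h x (by simp [hx]))

-- collapse with a nonempty star-free prefix before a star
theorem collapse_decomp (s0 r : List Char) (h0 : s0 ≠ []) (hs : ∀ x ∈ s0, x ≠ '*') :
    collapse '*' (s0 ++ '*' :: r) = s0 ++ '*' :: collapse '*' r := by
  cases s0 with
  | nil => exact absurd rfl h0
  | cons e s0' =>
    have he : e ≠ '*' := hs e (by simp)
    have hstep : collapse '*' (e :: (s0' ++ '*' :: r)) = e :: collapse e (s0' ++ '*' :: r) := by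
      simp [collapse, he]
    rw [List.cons_append, hstep,
      collapse_append_no_star s0' ('*' :: r) e he (fun x hx => hs x (List.mem_cons_of_mem _ hx))]
    have hx : collapse 'x' ('*' :: r) = '*' :: collapse '*' r := by simp [collapse]
    rw [hx]
    simp

-- collapse is the identity on star-free input
theorem collapse_no_star (l : List Char) (hs : '*' ∉ l) : collapse '*' l = l := by
  cases l with
  | nil => rfl
  | cons a t =>
    have ha : a ≠ '*' := by intro hx; exact hs (by simp [hx])
    have hstep : collapse '*' (a :: t) = a :: collapse a t := by simp [collapse, ha]
    have ht := collapse_append_no_star t [] a ha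
      (fun x hx hx' => hs (by simp [hx' ▸ hx]))
    simp only [List.append_nil] at ht
    rw [hstep, ht]
    simp [collapse]

-- splitOn is splitOnP on (· == '*')
theorem splitOn_eq (l : List Char) : l.splitOn '*' = l.splitOnP (· == '*') := rfl

-- intercalate over a cons with a nonempty tail
theorem intercalate_cons_ne (sep x : List Char) (xs : List (List Char)) (h : xs ≠ []) :
    List.intercalate sep (x :: xs) = x ++ sep ++ List.intercalate sep xs := by
  cases xs with
  | nil => exact absurd rfl h
  | cons y ys => simp [List.intercalate]

-- empty segment list means the input is all stars
theorem segs_nil_all_star (l : List Char)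
    (h : (l.splitOn '*').filter (fun s => s ≠ []) = []) : ∀ x ∈ l, x = '*' := by
  induction l with
  | nil => simp
  | cons c rest ih =>
    by_cases hc : c = '*'
    · subst hc
      rw [splitOn_eq, List.splitOnP_cons] at h
      simp only [beq_self_eq_true, if_true, List.filter_cons, decide_eq_true_eq] at h
      rw [if_neg (by simp)] at h
      intro x hx
      rcases List.mem_cons.mp hx with h1 | h2
      · exact h1
      · exact ih (by rw [splitOn_eq]; exact h) x h2
    · exfalso
      rw [splitOn_eq, List.splitOnP_cons, if_neg (by simp [hc])] at h
      obtain ⟨s0, ss, hss⟩ := List.exists_cons_of_ne_nil (List.splitOnP_ne_nil (· == '*') rest)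
      rw [hss] at h
      simp at h

-- endswith ['*'] tested via getLast?
theorem endswith_star_iff (l : List Char) :
    PySem.Chars.endswith l ['*'] = true ↔ l.getLast? = some '*' := by
  rw [PySem.Chars.endswith_iff, List.getLast?_eq_some_iff]
  constructor
  · rintro ⟨s, rfl⟩; exact ⟨s, rfl⟩
  · rintro ⟨ys, rfl⟩; exact ⟨ys, rfl⟩

-- main lemma: the split/filter/join pipeline computes collapse '*'
theorem join_segs_eq_collapse (l : List Char)
    (h : (l.splitOn '*').filter (fun s => s ≠ []) ≠ []) :
    List.intercalate ['*'] ((l.splitOn '*').filter (fun s => s ≠ [])) ++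
      (if l.getLast? = some '*' then ['*'] else []) = collapse '*' l := by
  by_cases hs : '*' ∈ l
  · -- l = s0 ++ '*' :: r with s0 star-free
    have hdw : l.dropWhile (fun x => x ≠ '*') ≠ [] := by
      intro hnil
      rw [List.dropWhile_eq_nil_iff] at hnil
      have := hnil '*' hs
      simp at this
    obtain ⟨d, r, hdr⟩ := List.exists_cons_of_ne_nil hdw
    have hd : d = '*' := by
      have hnot := List.head_dropWhile_not (fun x => decide (x ≠ '*')) hdw
      have hhead : (l.dropWhile (fun x => decide (x ≠ '*'))).head hdw = d := by
        have h1 : some ((l.dropWhile (fun x => decide (x ≠ '*'))).head hdw) = some d := by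
          rw [← List.head?_eq_some_head hdw, hdr]
          rfl
        exact Option.some.inj h1
      rw [hhead] at hnot
      simpa using hnot
    subst hd
    have hl : l.takeWhile (fun x => x ≠ '*') ++ '*' :: r = l := by
      conv_rhs => rw [← List.takeWhile_append_dropWhile (p := fun x => decide (x ≠ '*')) (l := l)]
      rw [hdr]
    set s0 := l.takeWhile (fun x => x ≠ '*') with hs0
    have hs0star : ∀ x ∈ s0, x ≠ '*' := by
      intro x hx
      have := List.mem_takeWhile_imp hx
      simpa using this
    have hsplit : l.splitOn '*' = s0 :: r.splitOnP (· == '*') := by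
      rw [← hl, splitOn_eq]
      exact List.splitOnP_first _ s0 (by intro x hx; simpa using hs0star x hx) '*' (by simp) r
    have hrlen : r.length < l.length := by
      have := congrArg List.length hl
      simp at this
      omega
    by_cases hr0 : (r.splitOn '*').filter (fun s => s ≠ []) = []
    · -- r is all stars (possibly empty)
      have hrstar : ∀ x ∈ r, x = '*' := segs_nil_all_star r hr0
      have hcolr : collapse '*' r = [] := collapse_all_star r hrstar
      have hsegs : (l.splitOn '*').filter (fun s => s ≠ []) =
          (if s0 = [] then [] else [s0]) := by
        rw [hsplit, List.filter_cons, ← splitOn_eq, hr0]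
        by_cases h0 : s0 = [] <;> simp [h0]
      by_cases h0 : s0 = []
      · rw [hsegs, if_pos h0] at h; simp at h
      · have hlast : l.getLast? = some '*' := by
          rw [← hl]
          cases hr : r with
          | nil => simp
          | cons a t =>
            rw [List.getLast?_append_of_ne_nil _ (by simp)]
            have : ('*' :: a :: t).getLast? = (a :: t).getLast? := List.getLast?_cons_cons
            rw [this, List.getLast?_eq_some_iff]
            obtain ⟨b, u, hu⟩ := List.exists_cons_of_ne_nil (l := (a :: t).reverse) (by simp)
            refine ⟨u.reverse, ?_⟩
            have hb : b = '*' := by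
              have hbmem : b ∈ (a :: t).reverse := by rw [hu]; simp
              have := hrstar b (by rw [hr]; exact List.mem_reverse.mp hbmem)
              exact this
            have := congrArg List.reverse hu
            simp at this
            rw [this, hb]
        rw [hsegs, if_neg h0, if_pos hlast]
        have hcol : collapse '*' l = s0 ++ '*' :: collapse '*' r := by
          rw [← hl]; exact collapse_decomp s0 r h0 hs0star
        rw [hcol, hcolr]
        simp [List.intercalate]
    · -- r still contains a real segment: recurse
      have hrne : r ≠ [] := by
        intro hnil; rw [hnil] at hr0; simp at hr0
      have ih := join_segs_eq_collapse r hr0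
      have hlastlr : l.getLast? = r.getLast? := by
        rw [← hl, List.getLast?_append_of_ne_nil _ (by simp)]
        cases hr2 : r with
        | nil => exact absurd hr2 hrne
        | cons a t => exact List.getLast?_cons_cons
      by_cases h0 : s0 = []
      · -- l = '*' :: r : segments and collapse both reduce to r
        have hcol : collapse '*' l = collapse '*' r := by
          rw [← hl, h0, List.nil_append]
          simp [collapse]
        rw [hsplit, h0, List.filter_cons, if_neg (by simp), ← splitOn_eq, hlastlr, ih, hcol]
      · have hcol : collapse '*' l = s0 ++ '*' :: collapse '*' r := by
          rw [← hl]; exact collapse_decomp s0 r h0 hs0star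
        rw [hsplit, List.filter_cons, if_pos (by simp [h0]), ← splitOn_eq,
          intercalate_cons_ne ['*'] s0 _ hr0, hlastlr, hcol]
        simp only [List.append_assoc, List.cons_append, List.nil_append]
        rw [ih]
  · -- no star at all: single segment, collapse is the identity
    have hsingle : l.splitOn '*' = [l] := by
      rw [splitOn_eq]
      exact List.splitOnP_eq_single _ _ (by intro x hx; simp; intro he; exact hs (he ▸ hx))
    have hlne : l ≠ [] := by
      intro hnil; rw [hnil] at h; simp at h
    have hlast : ¬ (l.getLast? = some '*') := by
      intro hx
      rw [List.getLast?_eq_some_iff] at hx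
      obtain ⟨ys, rfl⟩ := hx
      exact hs (by simp)
    rw [hsingle, collapse_no_star l hs, if_neg hlast]
    simp [List.intercalate, hlne]
termination_by l.length

-- B's value on a nonempty input, in terms of collapse
theorem transp_alt_char (c : Char) (cs : List Char) :
    transp_alt (String.ofList (c :: cs)) =
      String.ofList (if collapse '*' (c :: cs) = [] then ['*']
        else collapse '*' (c :: cs)) := by
  unfold transp_alt
  simp only [String.toList_ofList]
  rw [if_neg (by simp)]
  by_cases hsegs : ((c :: cs).splitOn '*').filter (fun s => s ≠ []) = []
  · have hcol : collapse '*' (c :: cs) = [] :=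
      collapse_all_star _ (segs_nil_all_star _ hsegs)
    rw [if_pos hsegs, hcol]
    decide
  · rw [if_neg hsegs]
    have hmain := join_segs_eq_collapse (c :: cs) hsegs
    have hcolne : collapse '*' (c :: cs) ≠ [] := by
      intro h0
      rw [h0] at hmain
      have h1 := List.append_eq_nil_iff.mp hmain
      obtain ⟨s0, ss, hss⟩ := List.exists_cons_of_ne_nil hsegs
      rw [hss] at h1
      rcases ss with _ | ⟨y, ys⟩
      · have hs0 : s0 ≠ [] := by
          have : s0 ∈ ((c :: cs).splitOn '*').filter (fun s => s ≠ []) := by rw [hss]; simp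
          simpa using (List.mem_filter.mp this).2
        exact hs0 (by simpa [List.intercalate] using h1.1)
      · rw [intercalate_cons_ne _ _ _ (by simp)] at h1
        simp at h1
    rw [if_neg hcolne]
    congr 1
    rw [← hmain]
    congr 1
    by_cases hend : (c :: cs).getLast? = some '*'
    · rw [if_pos hend, if_pos ((endswith_star_iff (c :: cs)).mpr hend)]
    · rw [if_neg hend, if_neg (by
        intro hx
        exact hend ((endswith_star_iff (c :: cs)).mp hx))]

-- ===== VERDICT (by name: the statement is the Claim_ definition above) =====
theorem transp_spec : Claim_equal_transp := by
  intro p _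
  unfold Spec_transp
  have hp : String.ofList p.toList = p := String.ofList_toList
  rw [← hp]
  cases hc : p.toList with
  | nil => simp [transp, transp_alt]
  | cons c cs => rw [transp_char, transp_alt_char]
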